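-- pv_equiv track=rewrite | github.com/sammycee769/Python-classworks | roastedcorn_function.py | check_last_first_index
-- ===== SOURCE A (Python) =====
-- def check_last_first_index(words):
--     bength = ""
--     largest = len(words[0])
--     for string in words:
--         if len(string) > largest:
--             largest = len(string)
--             if largest == len(string):
--                 bength += string
--     return largest, bength
-- ===== SOURCE B (Python) =====
-- def check_last_first_index(words):
--     lens = [len(w) for w in words]
--     largest = max(lens)
--     bength = "".join(words[i] for i in range(1, len(words))
--                      if lens[i] > max(lens[:i]))
--     return largest, bength
-- ===== Notes on version B (the rewrite author's own statement) =====
-- stated objective: alternative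
-- what changed: Replaces A's single stateful running-max loop by a table formulation: a list of lengths, largest = max(lens), and a join over the indices i >= 1 whose length strictly exceeds max(lens[:i]).
import Mathlib
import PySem

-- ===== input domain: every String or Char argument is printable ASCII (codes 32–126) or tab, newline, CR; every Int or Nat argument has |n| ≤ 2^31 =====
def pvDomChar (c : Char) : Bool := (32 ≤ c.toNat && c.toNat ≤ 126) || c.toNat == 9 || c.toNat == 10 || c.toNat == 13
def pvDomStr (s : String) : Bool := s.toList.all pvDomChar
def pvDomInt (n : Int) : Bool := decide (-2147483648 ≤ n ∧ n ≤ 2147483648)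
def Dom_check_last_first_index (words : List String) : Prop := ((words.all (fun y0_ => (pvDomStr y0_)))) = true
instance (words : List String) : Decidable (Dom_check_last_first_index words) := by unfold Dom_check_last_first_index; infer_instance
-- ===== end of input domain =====

-- B replaces A's single stateful running-max loop by a table formulation (length list, its max,
-- and a join over the indices whose length beats max(lens[:i])).  Objective: alternative.

-- ===== PORT A =====
def check_last_first_index (words : List String) : Int × String :=
  -- words[0]: Python raises IndexError on []; excluded by Pre_, so the default is unreachable there
  let st := words.foldl (fun (st : Int × List Char) s =>
    if PySem.Str.len s > st.1 then
      let largest := PySem.Str.len s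
      if largest == PySem.Str.len s then (largest, st.2 ++ s.toList) else (largest, st.2)
    else st) (PySem.Str.len (PySem.List.pyGetD words 0 ""), [])
  (st.1, String.ofList st.2)

-- ===== PORT B =====
def check_last_first_index_alt (words : List String) : Int × String :=
  let lens := words.map PySem.Str.len
  -- max(lens): Python raises ValueError on []; excluded by Pre_, so the default is unreachable there
  let largest := (PySem.List.max? lens (fun x => x)).getD 0
  let parts := ((PySem.List.pyRange 1 (PySem.List.len words) 1).filter (fun i =>
      decide (PySem.List.pyGetD lens i 0 >
        (PySem.List.max? (PySem.List.slice lens none (some i)) (fun x => x)).getD 0))).map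
    (fun i => PySem.List.pyGetD words i "")
  (largest, PySem.Str.join "" parts)

-- ===== PRECONDITION & SPEC =====
-- Pre_ excludes only the empty list, on which both A (words[0], IndexError) and B (max([]), ValueError) raise.
def Pre_check_last_first_index (words : List String) : Prop := words ≠ []
instance (words : List String) : Decidable (Pre_check_last_first_index words) := by unfold Pre_check_last_first_index; infer_instance
def pvWitness_check_last_first_index : List String := ["ab", "c", "def"]

def Spec_check_last_first_index (words : List String) (out : Int × String) : Prop := out = check_last_first_index_alt words
instance (words : List String) (out : Int × String) : Decidable (Spec_check_last_first_index words out) := by unfold Spec_check_last_first_index; infer_instance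

-- ===== CLAIM (what is proved, stated in full; the proofs are below) =====
def Claim_equal_check_last_first_index : Prop := ∀ (words : List String), Dom_check_last_first_index words → Pre_check_last_first_index words → Spec_check_last_first_index words (check_last_first_index words)

-- ===== LEMMAS AND PROOFS =====

-- the strict record-breakers of ws relative to the running max m
def pvRecs (m : Int) : List String → List String
  | [] => []
  | s :: t => if PySem.Str.len s > m then s :: pvRecs (PySem.Str.len s) t else pvRecs m t

-- running max of the lengths starting at m
def pvRMax (m : Int) (ws : List String) : Int := ws.foldl (fun a s => max a (PySem.Str.len s)) m

lemma pvRMax_append (m : Int) (xs ys : List String) :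
    pvRMax m (xs ++ ys) = pvRMax (pvRMax m xs) ys := by
  simp [pvRMax, List.foldl_append]

lemma pvRMax_cons (m : Int) (s : String) (ws : List String) :
    pvRMax m (s :: ws) = pvRMax (max m (PySem.Str.len s)) ws := rfl

lemma pvA_loop (ws : List String) (m : Int) (acc : List Char) :
    ws.foldl (fun (st : Int × List Char) s =>
      if PySem.Str.len s > st.1 then
        let largest := PySem.Str.len s
        if largest == PySem.Str.len s then (largest, st.2 ++ s.toList) else (largest, st.2)
      else st) (m, acc)
    = (pvRMax m ws, acc ++ ((pvRecs m ws).map String.toList).flatten) := by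
  have hfun : (fun (st : Int × List Char) s =>
      if PySem.Str.len s > st.1 then
        let largest := PySem.Str.len s
        if largest == PySem.Str.len s then (largest, st.2 ++ s.toList) else (largest, st.2)
      else st)
      = (fun (st : Int × List Char) s =>
          if PySem.Str.len s > st.1 then (PySem.Str.len s, st.2 ++ s.toList) else st) := by
    funext st s
    by_cases h' : PySem.Str.len s > st.1
    · rw [if_pos h', if_pos h']
      simp
    · rw [if_neg h', if_neg h']
  rw [hfun]
  induction ws generalizing m acc with
  | nil => simp [pvRMax, pvRecs]
  | cons s t ih =>
    simp only [List.foldl_cons]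
    by_cases h : PySem.Str.len s > m
    · rw [if_pos h, ih, pvRMax_cons, max_eq_right (le_of_lt h)]
      simp only [pvRecs]
      rw [if_pos h]
      simp
    · rw [if_neg h, ih, pvRMax_cons, max_eq_left (not_lt.mp h)]
      simp only [pvRecs]
      rw [if_neg h]

lemma pvCharsJoinNil : ∀ (ls : List (List Char)), PySem.Chars.join [] ls = ls.flatten
  | [] => by rw [PySem.Chars.join_nil]; rfl
  | [a] => by rw [PySem.Chars.join_singleton]; simp
  | a :: b :: t => by rw [PySem.Chars.join_cons_cons, pvCharsJoinNil (b :: t)]; simp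

lemma pvJoinStr (parts : List String) :
    PySem.Str.join "" parts = String.ofList ((parts.map String.toList).flatten) := by
  show String.ofList (PySem.Chars.join ("").toList (parts.map String.toList)) = _
  rw [show ("" : String).toList = [] from rfl, pvCharsJoinNil]

lemma pvB_parts (w0 : String) (ws pre : List String) :
    ((PySem.List.pyRange ((pre.length + 1 : Nat) : Int) (((w0 :: (pre ++ ws)).length : Nat) : Int) 1).filter
        (fun i => decide (PySem.List.pyGetD ((w0 :: (pre ++ ws)).map PySem.Str.len) i 0 >
          (PySem.List.max? (PySem.List.slice ((w0 :: (pre ++ ws)).map PySem.Str.len) none (some i)) (fun x => x)).getD 0))).map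
      (fun i => PySem.List.pyGetD (w0 :: (pre ++ ws)) i "")
    = pvRecs (pvRMax (PySem.Str.len w0) pre) ws := by
  induction ws generalizing pre with
  | nil =>
    rw [PySem.List.pyRange_one_eq_nil (by simp)]
    simp [pvRecs]
  | cons s t ih =>
    have hlt : ((pre.length + 1 : Nat) : Int) < (((w0 :: (pre ++ s :: t)).length : Nat) : Int) := by
      simp only [List.length_cons, List.length_append]
      exact_mod_cast by omega
    have hidx : PySem.List.pyGetD ((w0 :: (pre ++ s :: t)).map PySem.Str.len) ((pre.length + 1 : Nat) : Int) 0
        = PySem.Str.len s := by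
      rw [PySem.List.pyGetD_natCast]
      simp
    have hword : PySem.List.pyGetD (w0 :: (pre ++ s :: t)) ((pre.length + 1 : Nat) : Int) "" = s := by
      rw [PySem.List.pyGetD_natCast]
      simp
    have hsl : PySem.List.slice ((w0 :: (pre ++ s :: t)).map PySem.Str.len) none (some ((pre.length + 1 : Nat) : Int))
        = PySem.Str.len w0 :: pre.map PySem.Str.len := by
      rw [PySem.List.slice_to_natCast]
      simp [List.take_succ_cons, List.take_left']
    have hmax : (PySem.List.max? (PySem.Str.len w0 :: pre.map PySem.Str.len) (fun x => x)).getD 0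
        = pvRMax (PySem.Str.len w0) pre := by
      rw [PySem.List.max?_id_cons]
      simp only [Option.getD_some]
      rw [List.foldl_map]
      rfl
    rw [PySem.List.pyRange_one_cons hlt]
    simp only [List.filter_cons, hidx, hsl, hmax, decide_eq_true_eq]
    have ih' := ih (pre ++ [s])
    have e1 : (pre ++ [s]) ++ t = pre ++ s :: t := by simp
    rw [e1] at ih'
    have e2 : (((pre ++ [s]).length + 1 : Nat) : Int) = ((pre.length + 1 : Nat) : Int) + 1 := by
      push_cast [List.length_append, List.length_cons, List.length_nil]
      ring
    rw [e2] at ih'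
    by_cases h : PySem.Str.len s > pvRMax (PySem.Str.len w0) pre
    · have e3 : pvRMax (PySem.Str.len w0) (pre ++ [s]) = PySem.Str.len s := by
        rw [pvRMax_append]
        show max (pvRMax (PySem.Str.len w0) pre) (PySem.Str.len s) = PySem.Str.len s
        exact max_eq_right (le_of_lt h)
      rw [e3] at ih'
      rw [if_pos h]
      simp only [List.map_cons, hword, pvRecs]
      rw [if_pos h]
      exact congrArg (s :: ·) ih'
    · have e3 : pvRMax (PySem.Str.len w0) (pre ++ [s]) = pvRMax (PySem.Str.len w0) pre := by
        rw [pvRMax_append]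
        show max (pvRMax (PySem.Str.len w0) pre) (PySem.Str.len s) = pvRMax (PySem.Str.len w0) pre
        exact max_eq_left (not_lt.mp h)
      rw [e3] at ih'
      rw [if_neg h]
      simp only [pvRecs]
      rw [if_neg h]
      exact ih'

-- ===== VERDICT (by name: the statement is the Claim_ definition above) =====
theorem check_last_first_index_spec : Claim_equal_check_last_first_index := by
  intro words _hdom hpre
  unfold Spec_check_last_first_index
  cases words with
  | nil => exact absurd rfl hpre
  | cons w0 ws =>
    have hA : check_last_first_index (w0 :: ws)
        = (pvRMax (PySem.Str.len w0) ws, String.ofList (((pvRecs (PySem.Str.len w0) ws).map String.toList).flatten)) := by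
      simp only [check_last_first_index, PySem.List.pyGetD_zero_cons, List.foldl_cons]
      rw [if_neg (lt_irrefl _), pvA_loop]
      simp
    have hmax0 : (PySem.List.max? ((w0 :: ws).map PySem.Str.len) (fun x => x)).getD 0
        = pvRMax (PySem.Str.len w0) ws := by
      rw [List.map_cons, PySem.List.max?_id_cons]
      simp only [Option.getD_some]
      rw [List.foldl_map]
      rfl
    have hparts := pvB_parts w0 ws []
    simp only [List.nil_append, List.length_nil, Nat.zero_add, Nat.cast_one, pvRMax, List.foldl_nil] at hparts
    have hB : check_last_first_index_alt (w0 :: ws)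
        = (pvRMax (PySem.Str.len w0) ws, String.ofList (((pvRecs (PySem.Str.len w0) ws).map String.toList).flatten)) := by
      simp only [check_last_first_index_alt, PySem.List.len_eq]
      rw [hmax0, pvJoinStr]
      exact congrArg (fun l => (pvRMax (PySem.Str.len w0) ws,
        String.ofList ((List.map String.toList l).flatten))) hparts
    rw [hA, hB]
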